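-- pv_equiv track=rewrite | github.com/nishantsharma/xml.ai | src/DeepInXML/hier2hier/models/hier2hierBatch.py | computeDimSqueezePoints
-- ===== SOURCE A (Python) =====
-- def computeDimSqueezePoints(outputLimitsInOrder):
--     """
--     Compute the positions in output symbol computation, where we exclude another batch of trees from
--     further consideration. We do that because the excluded output trees have their symbol computation already
--     completed and need no more computation. Only used during training, when target output lengths are available.
--
--     Input:
--         outputLimitsInOrder: Length of target outputs in decreasing order.
--
--     Output:
--         dimSqueezePoints: List of tuples (outputIndexLimit, sampleIndexLimit)
--             [(oil1, sil1), (oil2, sil2), (oil3, sil3), (oil4, sil4), ]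
--             For output indices [0, 1, ..., oil1-1] we use sampleIndexLimit as sil1.
--             For output indices [oil1, oil1+1, ..., oil2-1] we use sampleIndexLimit as sil2.
--             For output indices [oil2, oil2+1, ..., oil3-1] we use sampleIndexLimit as sil3.
--             .
--             .
--             For output indices [oil2ndLast, oil2ndLast+1, ..., oilLast-1] we use sampleIndexLimit as silLast.
--
--     """
--     dimSqueezePoints = []
--     outputLimitsInOrder = [ int(outputLimit) for outputLimit in outputLimitsInOrder ]
--     sampleCount = len(outputLimitsInOrder)
--     curOutputLimit = outputLimitsInOrder[-1]
--
--     dimSqueezePoints.append((curOutputLimit, sampleCount))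
--
--     for sampleLimit, outputLimit in enumerate(outputLimitsInOrder[::-1]):
--         if outputLimit == curOutputLimit:
--             continue
--
--         curOutputLimit = outputLimit
--         dimSqueezePoints.append((curOutputLimit, sampleCount - sampleLimit))
--
--     return dimSqueezePoints
-- ===== SOURCE B (Python) =====
-- def computeDimSqueezePoints(outputLimitsInOrder):
--     """Forward pairwise comparison: a squeeze point sits at every index k where
--     ints[k] != ints[k+1]; seed with the last element, then list the boundaries
--     back-to-front."""
--     ints = [int(x) for x in outputLimitsInOrder]
--     n = len(ints)
--     head = (ints[-1], n)
--     boundaries = [(a, k + 1) for k, (a, b) in enumerate(zip(ints, ints[1:])) if a != b]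
--     return [head] + boundaries[::-1]
-- ===== Notes on version B (the rewrite author's own statement) =====
-- stated objective: simpler
-- what changed: Replaced A's reversed-list scan with a curOutputLimit state machine by a stateless forward pass: zip the list with its own tail, a comprehension collects one (value, k+1) boundary per adjacent unequal pair, and the result is the seeded last-element pair followed by those boundaries reversed.
import Mathlib
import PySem

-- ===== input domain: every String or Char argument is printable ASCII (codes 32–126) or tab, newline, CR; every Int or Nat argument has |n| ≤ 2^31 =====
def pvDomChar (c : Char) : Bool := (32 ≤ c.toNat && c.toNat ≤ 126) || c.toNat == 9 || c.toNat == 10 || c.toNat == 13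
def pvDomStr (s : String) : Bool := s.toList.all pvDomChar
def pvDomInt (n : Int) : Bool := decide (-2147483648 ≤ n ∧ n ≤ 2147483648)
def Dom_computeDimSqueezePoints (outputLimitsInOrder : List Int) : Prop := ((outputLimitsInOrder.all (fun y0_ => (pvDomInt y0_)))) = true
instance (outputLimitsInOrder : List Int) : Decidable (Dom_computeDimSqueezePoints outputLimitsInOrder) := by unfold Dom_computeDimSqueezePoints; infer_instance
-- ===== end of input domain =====

-- B replaces A's reversed-scan curOutputLimit state machine by a stateless forward pass:
-- one boundary per adjacent unequal pair (zip with the tail), listed back-to-front (objective: simpler).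


-- ===== PORT A =====
-- the for-loop over enumerate(outputLimitsInOrder[::-1]) with state (curOutputLimit, dimSqueezePoints);
-- pos is the enumerate counter sampleLimit
def aLoop (n : Int) : List Int → Int → Int → List (Int × Int) → List (Int × Int)
  | [], _, _, acc => acc
  | outputLimit :: rest, pos, cur, acc =>
      if outputLimit == cur then aLoop n rest (pos + 1) cur acc
      else aLoop n rest (pos + 1) outputLimit (acc ++ [(outputLimit, n - pos)])

def computeDimSqueezePoints (outputLimitsInOrder : List Int) : List (Int × Int) :=
  -- indexing the last element: IndexError on the empty list, excluded by Pre_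
  match PySem.List.pyGet? outputLimitsInOrder (-1) with
  | none => []
  | some curOutputLimit =>
      let sampleCount : Int := outputLimitsInOrder.length
      aLoop sampleCount outputLimitsInOrder.reverse 0 curOutputLimit [(curOutputLimit, sampleCount)]

-- ===== PORT B =====
-- the comprehension's body: for (k, (a, b)), keep (a, k + 1) iff a ≠ b
def bBoundary (p : Int × (Int × Int)) : Option (Int × Int) :=
  if p.2.1 ≠ p.2.2 then some (p.2.1, p.1 + 1) else none

def computeDimSqueezePoints_alt (outputLimitsInOrder : List Int) : List (Int × Int) :=
  let n : Int := outputLimitsInOrder.length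
  -- indexing the last element: IndexError on the empty list, excluded by Pre_
  match PySem.List.pyGet? outputLimitsInOrder (-1) with
  | none => []
  | some last =>
      -- zip(ints, ints[1:]) with enumerate, filtered by the comprehension's condition
      let boundaries :=
        (PySem.List.enumerate (outputLimitsInOrder.zip outputLimitsInOrder.tail) 0).filterMap bBoundary
      (last, n) :: boundaries.reverse

-- ===== PRECONDITION & SPEC =====
-- A indexes the last element first: IndexError on the empty list, hence excluded
def Pre_computeDimSqueezePoints (outputLimitsInOrder : List Int) : Prop := outputLimitsInOrder ≠ []
instance (outputLimitsInOrder : List Int) : Decidable (Pre_computeDimSqueezePoints outputLimitsInOrder) := by unfold Pre_computeDimSqueezePoints; infer_instance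
def pvWitness_computeDimSqueezePoints : List Int := [5, 3, 3, 1]

def Spec_computeDimSqueezePoints (outputLimitsInOrder : List Int) (out : List (Int × Int)) : Prop := out = computeDimSqueezePoints_alt outputLimitsInOrder
instance (outputLimitsInOrder : List Int) (out : List (Int × Int)) : Decidable (Spec_computeDimSqueezePoints outputLimitsInOrder out) := by unfold Spec_computeDimSqueezePoints; infer_instance

-- ===== CLAIM (what is proved, stated in full; the proofs are below) =====
def Claim_equal_computeDimSqueezePoints : Prop := ∀ (outputLimitsInOrder : List Int), Dom_computeDimSqueezePoints outputLimitsInOrder → Pre_computeDimSqueezePoints outputLimitsInOrder → Spec_computeDimSqueezePoints outputLimitsInOrder (computeDimSqueezePoints outputLimitsInOrder)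

-- ===== LEMMAS AND PROOFS =====

-- A's loop, with the accumulator factored out: emitE emits (x, n - pos) at every position
-- whose value differs from the previous one (initially cur)
def emitE (n : Int) : List Int → Int → Int → List (Int × Int)
  | [], _, _ => []
  | x :: rest, pos, cur => (if x = cur then [] else [(x, n - pos)]) ++ emitE n rest (pos + 1) x

theorem aLoop_eq_emitE (n : Int) (l : List Int) : ∀ (pos cur : Int) (acc : List (Int × Int)),
    aLoop n l pos cur acc = acc ++ emitE n l pos cur := by
  induction l with
  | nil => intro pos cur acc; simp [aLoop, emitE]
  | cons x rest ih =>
      intro pos cur acc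
      by_cases h : x = cur
      · subst h; simp [aLoop, emitE, ih]
      · have hb : (x == cur) = false := by simp [h]
        simp [aLoop, emitE, hb, h, ih]

theorem emitE_append (n : Int) (l1 : List Int) : ∀ (l2 : List Int) (pos cur : Int),
    emitE n (l1 ++ l2) pos cur
      = emitE n l1 pos cur ++ emitE n l2 (pos + l1.length) (l1.getLastD cur) := by
  induction l1 with
  | nil => intro l2 pos cur; simp [emitE]
  | cons x rest ih =>
      intro l2 pos cur
      simp only [List.cons_append, emitE, ih, List.getLastD_cons, List.length_cons,
        List.append_assoc]
      rw [show pos + ((rest.length + 1 : Nat) : Int) = pos + 1 + rest.length by push_cast; ring]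

theorem getLastD_reverse_headD (l : List Int) (c : Int) : l.reverse.getLastD c = l.headD c := by
  cases l <;> simp [List.getLastD_eq_getLast?, List.getLast?_reverse]

theorem zip_sentinel (z c : Int) (zs : List Int) :
    (z :: zs).zip (zs ++ [c]) = (z, zs.headD c) :: zs.zip (zs.tail ++ [c]) := by
  cases zs <;> simp

-- core correspondence: A's emissions over the reversed list are B's forward boundaries, reversed
theorem emitE_rev (c : Int) : ∀ (ys : List Int) (off n : Int), n = off + ys.length →
    emitE n ys.reverse 0 c
      = ((PySem.List.enumerate (ys.zip (ys.tail ++ [c])) off).filterMap bBoundary).reverse := by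
  intro ys
  induction ys with
  | nil => intro off n _; simp [emitE]
  | cons z zs ih =>
      intro off n hn
      rw [List.length_cons] at hn
      rw [List.reverse_cons, emitE_append, ih (off + 1) n (by push_cast at hn ⊢; omega)]
      simp only [List.tail_cons]
      rw [zip_sentinel, PySem.List.enumerate_cons, List.filterMap_cons]
      have hpos : n - (zs.length : Int) = off + 1 := by push_cast at hn ⊢; omega
      rw [getLastD_reverse_headD]
      by_cases h : z = zs.head?.getD c
      · simp [emitE, h, bBoundary]
      · simp [emitE, h, bBoundary, hpos]

theorem zip_snoc_last (c : Int) : ∀ (xs : List Int) (h : xs ≠ []),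
    xs.zip (xs.tail ++ [c]) = xs.zip xs.tail ++ [(xs.getLast h, c)] := by
  intro xs
  induction xs with
  | nil => intro h; exact absurd rfl h
  | cons x xs ih =>
      intro _
      cases xs with
      | nil => simp
      | cons y ys =>
          simp only [List.tail_cons, List.cons_append, List.zip_cons_cons,
            List.getLast_cons (by simp : (y :: ys) ≠ [])]
          rw [show (y :: ys).zip (ys ++ [c]) = (y :: ys).zip ((y :: ys).tail ++ [c]) by rfl,
            ih (by simp)]
          simp

theorem computeDimSqueezePoints_spec : Claim_equal_computeDimSqueezePoints := by
  intro xs _ hpre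
  unfold Spec_computeDimSqueezePoints computeDimSqueezePoints computeDimSqueezePoints_alt
  have hlast : PySem.List.pyGet? xs (-1) = some (xs.getLast hpre) := by
    rw [PySem.List.pyGet?_neg_one, List.getLast?_eq_some_getLast]
  rw [hlast]
  simp only
  rw [aLoop_eq_emitE, emitE_rev (xs.getLast hpre) xs 0 (xs.length) (by simp),
    zip_snoc_last (xs.getLast hpre) xs hpre, PySem.List.enumerate_append,
    List.filterMap_append]
  simp [bBoundary, PySem.List.enumerate]
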